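-- pv_equiv track=rewrite | github.com/MaX-Lo/ProjectEuler | 050_consecutive_prime_sum.py | get_prime_with_given_chain_length
-- ===== SOURCE A (Python) =====
-- def get_prime_with_given_chain_length(length, primes):
--     prime_set = set(primes)
--
--     prime_sum = sum(primes[x] for x in range(0, length))
--     if prime_sum in prime_set:
--         return prime_sum
--
--     for i in range(length, len(primes)):
--         prime_sum = prime_sum - primes[i-length] + primes[i]
--         if prime_sum in prime_set:
--             return prime_sum
--
--     return -1
-- ===== SOURCE B (Python) =====
-- def get_prime_with_given_chain_length(length, primes):
--     pre = [0]
--     for p in primes: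
--         pre.append(pre[-1] + p)
--     prime_set = set(primes)
--     window = pre[length] - pre[0]
--     if window in prime_set:
--         return window
--     for s in range(1, len(primes) - length + 1):
--         window = pre[s + length] - pre[s]
--         if window in prime_set:
--             return window
--     return -1
-- ===== Notes on version B (the rewrite author's own statement) =====
-- stated objective: alternative
-- what changed: B precomputes a prefix-sum table and reads every window sum as a table difference pre[s+length]-pre[s], replacing A's element-by-element sliding running sum.
-- outside the precondition, e.g. on get_prime_with_given_chain_length(-1, [5, 0]): A returns 0, B returns 5
import Mathlib
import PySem

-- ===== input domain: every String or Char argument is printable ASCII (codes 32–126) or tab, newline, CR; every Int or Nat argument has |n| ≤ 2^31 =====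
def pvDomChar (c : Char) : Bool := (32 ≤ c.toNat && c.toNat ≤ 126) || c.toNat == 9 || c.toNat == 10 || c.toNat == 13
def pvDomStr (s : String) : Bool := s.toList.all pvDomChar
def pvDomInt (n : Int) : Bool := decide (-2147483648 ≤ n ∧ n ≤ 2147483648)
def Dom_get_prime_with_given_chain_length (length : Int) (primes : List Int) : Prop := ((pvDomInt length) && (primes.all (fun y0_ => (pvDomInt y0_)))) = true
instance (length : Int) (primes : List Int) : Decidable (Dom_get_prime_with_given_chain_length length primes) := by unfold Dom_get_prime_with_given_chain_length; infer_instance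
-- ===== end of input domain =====

-- B replaces A's sliding running sum (with its separate initial-window pass) by a prefix-sum table
-- indexed per window start; alternative structure, same asymptotic cost.

-- ===== PORT A =====
-- the 'for i in range(length, len(primes))' loop with early return
def pvALoop (primes : List Int) (prime_set : PySem.Set Int) (length : Int) : List Int → Int → Int
  | [], _ => -1
  | i :: rest, prime_sum =>
    let s' := prime_sum - PySem.List.pyGetD primes (i - length) 0 + PySem.List.pyGetD primes i 0
    if prime_set.contains s' then s' else pvALoop primes prime_set length rest s'

def get_prime_with_given_chain_length (length : Int) (primes : List Int) : Int :=
  let prime_set := PySem.Set.ofList primes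
  let prime_sum := ((PySem.List.pyRange 0 length 1).map (fun x => PySem.List.pyGetD primes x 0)).sum
  if prime_set.contains prime_sum then prime_sum
  else pvALoop primes prime_set length (PySem.List.pyRange length (primes.length : Int) 1) prime_sum

-- ===== PORT B =====
-- the 'for s in range(len(primes) - length + 1)' loop with early return
def pvBLoop (pre : List Int) (prime_set : PySem.Set Int) (length : Int) : List Int → Int
  | [] => -1
  | s :: rest =>
    let window := PySem.List.pyGetD pre (s + length) 0 - PySem.List.pyGetD pre s 0
    if prime_set.contains window then window else pvBLoop pre prime_set length rest

def get_prime_with_given_chain_length_alt (length : Int) (primes : List Int) : Int :=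
  let pre := primes.foldl (fun pre p => pre ++ [PySem.List.pyGetD pre (-1) 0 + p]) [0]
  let prime_set := PySem.Set.ofList primes
  let window := PySem.List.pyGetD pre length 0 - PySem.List.pyGetD pre 0 0
  if prime_set.contains window then window
  else pvBLoop pre prime_set length (PySem.List.pyRange 1 ((primes.length : Int) - length + 1) 1)

-- ===== PRECONDITION & SPEC =====
-- Pre_ excludes length > len(primes), where A raises IndexError, and negative length, where
-- A's answer depends on Python's negative-index wraparound — an accident of A's implementation.
def Pre_get_prime_with_given_chain_length (length : Int) (primes : List Int) : Prop :=
  0 ≤ length ∧ length ≤ (primes.length : Int)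
instance (length : Int) (primes : List Int) : Decidable (Pre_get_prime_with_given_chain_length length primes) := by unfold Pre_get_prime_with_given_chain_length; infer_instance

def pvWitness_get_prime_with_given_chain_length : Int × List Int := (2, [2, 3, 5, 7, 13])

def Spec_get_prime_with_given_chain_length (length : Int) (primes : List Int) (out : Int) : Prop := out = get_prime_with_given_chain_length_alt length primes
instance (length : Int) (primes : List Int) (out : Int) : Decidable (Spec_get_prime_with_given_chain_length length primes out) := by unfold Spec_get_prime_with_given_chain_length; infer_instance

-- ===== CLAIM (what is proved, stated in full; the proofs are below) =====
def Claim_equal_get_prime_with_given_chain_length : Prop := ∀ (length : Int) (primes : List Int), Dom_get_prime_with_given_chain_length length primes → Pre_get_prime_with_given_chain_length length primes → Spec_get_prime_with_given_chain_length length primes (get_prime_with_given_chain_length length primes)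

-- ===== LEMMAS AND PROOFS =====

def pvPfx (primes : List Int) (k : Nat) : Int := (primes.take k).sum
theorem pvPfx_succ (primes : List Int) (k : Nat) (hk : k < primes.length) :
    pvPfx primes (k + 1) = pvPfx primes k + primes[k] := by
  simp only [pvPfx, List.take_add_one, List.getElem?_eq_getElem hk, Option.toList_some,
    List.sum_append, List.sum_cons, List.sum_nil]
  ring
theorem pre_foldl_char (xs : List Int) : ∀ (acc : List Int) (a : Int), acc.getLast? = some a →
    xs.foldl (fun pre p => pre ++ [PySem.List.pyGetD pre (-1) 0 + p]) acc
      = acc ++ (List.range xs.length).map (fun k => a + (xs.take (k + 1)).sum) := by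
  induction xs with
  | nil => intro acc a ha; simp
  | cons p rest ih =>
    intro acc a ha
    have hne : acc ≠ [] := by rintro rfl; simp at ha
    have hlast : PySem.List.pyGetD acc (-1) 0 = a := by
      rw [PySem.List.pyGetD_neg_one acc 0 hne]
      rwa [List.getLast_eq_iff_getLast?_eq_some]
    simp only [List.foldl_cons, hlast]
    rw [ih (acc ++ [a + p]) (a + p) (by simp)]
    simp only [List.length_cons, List.range_succ_eq_map, List.map_cons, List.map_map]
    simp [List.append_assoc]
    intro k hk
    ring
theorem pre_char (primes : List Int) :
    primes.foldl (fun pre p => pre ++ [PySem.List.pyGetD pre (-1) 0 + p]) [0]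
      = (List.range (primes.length + 1)).map (fun k => pvPfx primes k) := by
  rw [pre_foldl_char primes [0] 0 rfl]
  simp only [List.range_succ_eq_map, List.map_cons, List.map_map]
  simp [pvPfx]
theorem init_sum (primes : List Int) (L : Nat) (hL : L ≤ primes.length) :
    ((PySem.List.pyRange 0 (L : Int) 1).map (fun x => PySem.List.pyGetD primes x 0)).sum
      = pvPfx primes L := by
  rw [PySem.List.pyRange_zero_natCast]
  induction L with
  | zero => simp [pvPfx]
  | succ k ih =>
    rw [List.range_succ]
    have hk : k < primes.length := by omega
    simp only [List.map_append, List.sum_append, List.map_cons, List.map_nil,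
      List.sum_cons, List.sum_nil]
    rw [ih (by omega), pvPfx_succ primes k hk]
    simp [PySem.List.pyGetD_natCast, List.getD_eq_getElem?_getD, List.getElem?_eq_getElem hk]
theorem pre_getD (primes : List Int) (k : Nat) (hk : k ≤ primes.length) :
    ((List.range (primes.length + 1)).map (fun j => pvPfx primes j)).getD k 0 = pvPfx primes k := by
  rw [List.getD_eq_getElem?_getD, List.getElem?_eq_getElem (by simp; omega)]
  simp

theorem loop_eq (primes : List Int) (st : PySem.Set Int) (L : Nat) (hL : L ≤ primes.length)
    (c : Nat) : ∀ s : Nat, 1 ≤ s → s + c = primes.length - L + 1 →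
    pvALoop primes st (L : Int) (PySem.List.pyRange ((s + L - 1 : Nat) : Int) ((primes.length : Nat) : Int) 1)
        (pvPfx primes (s - 1 + L) - pvPfx primes (s - 1))
      = pvBLoop ((List.range (primes.length + 1)).map (fun j => pvPfx primes j)) st (L : Int)
        (PySem.List.pyRange (s : Int) ((primes.length - L + 1 : Nat) : Int) 1) := by
  induction c with
  | zero =>
    intro s h1 h2
    rw [PySem.List.pyRange_one_eq_nil (a := ((s + L - 1 : Nat) : Int)) (by omega),
        PySem.List.pyRange_one_eq_nil (by push_cast; omega)]
    simp [pvALoop, pvBLoop]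
  | succ c ih =>
    intro s h1 h2
    have hsn : s + L - 1 < primes.length := by omega
    rw [PySem.List.pyRange_one_cons (a := ((s + L - 1 : Nat) : Int)) (by omega),
        PySem.List.pyRange_one_cons (a := (s : Int)) (by push_cast; omega)]
    simp only [pvALoop, pvBLoop]
    have e1 : ((s + L - 1 : Nat) : Int) - (L : Int) = ((s - 1 : Nat) : Int) := by omega
    have e2 : (s : Int) + (L : Int) = ((s + L : Nat) : Int) := by push_cast; omega
    have g1 : primes.getD (s - 1) 0 = primes[s - 1]'(by omega) := List.getD_eq_getElem primes 0 (by omega)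
    have g2 : primes.getD (s + L - 1) 0 = primes[s + L - 1]'(by omega) := List.getD_eq_getElem primes 0 (by omega)
    have p1 : pvPfx primes (s - 1 + 1) = pvPfx primes (s - 1) + primes[s - 1]'(by omega) :=
      pvPfx_succ primes (s - 1) (by omega)
    have p2 : pvPfx primes (s + L - 1 + 1) = pvPfx primes (s + L - 1) + primes[s + L - 1]'(by omega) :=
      pvPfx_succ primes (s + L - 1) (by omega)
    have es : s - 1 + 1 = s := by omega
    have esl : s + L - 1 + 1 = s + L := by omega
    have esl2 : s - 1 + L = s + L - 1 := by omega
    simp only [es] at p1; simp only [esl] at p2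
    have hwA : pvPfx primes (s - 1 + L) - pvPfx primes (s - 1)
          - PySem.List.pyGetD primes (((s + L - 1 : Nat) : Int) - (L : Int)) 0
          + PySem.List.pyGetD primes ((s + L - 1 : Nat) : Int) 0
        = pvPfx primes (s + L) - pvPfx primes s := by
      rw [e1, PySem.List.pyGetD_natCast, PySem.List.pyGetD_natCast, g1, g2]
      simp only [esl2]
      omega
    have hwB : PySem.List.pyGetD ((List.range (primes.length + 1)).map (fun j => pvPfx primes j)) ((s : Int) + (L : Int)) 0
          - PySem.List.pyGetD ((List.range (primes.length + 1)).map (fun j => pvPfx primes j)) (s : Int) 0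
        = pvPfx primes (s + L) - pvPfx primes s := by
      rw [e2, PySem.List.pyGetD_natCast, PySem.List.pyGetD_natCast,
          pre_getD primes (s + L) (by omega), pre_getD primes s (by omega)]
    rw [hwA, hwB]
    have hrec := ih (s + 1) (by omega) (by omega)
    have r1 : ((s + 1 + L - 1 : Nat) : Int) = ((s + L - 1 : Nat) : Int) + 1 := by omega
    have r2 : ((s + 1 : Nat) : Int) = (s : Int) + 1 := by push_cast; omega
    have r3 : s + 1 - 1 + L = s + L := by omega
    have r4 : s + 1 - 1 = s := by omega
    rw [r1, r2, r3, r4] at hrec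
    cases hcb : st.contains (pvPfx primes (s + L) - pvPfx primes s) with
    | true => simp
    | false => simpa [hcb] using hrec
theorem pv_main (length : Int) (primes : List Int)
    (h0 : 0 ≤ length) (h1 : length ≤ (primes.length : Int)) :
    get_prime_with_given_chain_length length primes = get_prime_with_given_chain_length_alt length primes := by
  have hlen : length = (length.toNat : Int) := (Int.toNat_of_nonneg h0).symm
  set L := length.toNat with hLdef
  have hLn : L ≤ primes.length := by omega
  rw [hlen]
  simp only [get_prime_with_given_chain_length, get_prime_with_given_chain_length_alt]
  rw [pre_char, init_sum primes L hLn]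
  have hb : ((primes.length : Int) - (L : Int) + 1) = ((primes.length - L + 1 : Nat) : Int) := by
    push_cast; omega
  rw [hb]
  have hw0 : PySem.List.pyGetD ((List.range (primes.length + 1)).map (fun j => pvPfx primes j)) ((L : Nat) : Int) 0
        - PySem.List.pyGetD ((List.range (primes.length + 1)).map (fun j => pvPfx primes j)) (0 : Int) 0
      = pvPfx primes L := by
    rw [PySem.List.pyGetD_natCast, PySem.List.pyGetD_zero, pre_getD primes L (by omega)]
    have : ((List.range (primes.length + 1)).map (fun j => pvPfx primes j)).getD 0 0 = pvPfx primes 0 :=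
      pre_getD primes 0 (by omega)
    rw [this]
    simp [pvPfx]
  rw [hw0]
  simp only [pvPfx]
  have hrec := loop_eq primes (PySem.Set.ofList primes) L hLn (primes.length - L) 1 (by omega) (by omega)
  have q1 : (1 + L - 1 : Nat) = L := by omega
  have q2 : (1 - 1 + L : Nat) = L := by omega
  have q3 : ((1 : Nat) : Int) = (1 : Int) := by omega
  simp only [q1, q2, q3, Nat.sub_self, pvPfx, List.take_zero, List.sum_nil, sub_zero] at hrec
  by_cases hm : (primes.take L).sum ∈ primes
  · simp [hm]
  · simpa [hm] using hrec

-- ===== VERDICT (by name: the statement is the Claim_ definition above) =====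
theorem get_prime_with_given_chain_length_spec : Claim_equal_get_prime_with_given_chain_length := by
  intro length primes _ hpre
  unfold Spec_get_prime_with_given_chain_length
  exact pv_main length primes hpre.1 hpre.2
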